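-- pv_equiv track=rewrite | github.com/bodyisnumb/Adventure-of-Codi-2024 | day9/day9.2.py | find_leftmost_fit
-- ===== SOURCE A (Python) =====
-- def find_leftmost_fit(blocks: list[str], file_len: int, file_start: int) -> int:
--     count = 0
--     start_run = -1
--     for i in range(file_start):
--         if blocks[i] == '.':
--             if count == 0:
--                 start_run = i
--             count += 1
--             if count >= file_len:
--                 return start_run
--         else:
--             count = 0
--             start_run = -1
--     return -1
-- ===== SOURCE B (Python) =====
-- def find_leftmost_fit(blocks: list[str], file_len: int, file_start: int) -> int:
--     # Window scan: anchor at each '.', then test whether a whole run of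
--     # file_len free blocks fits there before file_start.
--     for start in range(file_start):
--         if blocks[start] != '.':
--             continue
--         if start + file_len <= file_start and all(blocks[start + k] == '.' for k in range(1, file_len)):
--             return start
--     return -1
-- ===== Notes on version B (the rewrite author's own statement) =====
-- stated objective: alternative
-- what changed: Replaces A's single stateful pass with a running counter and run-start register by a window scan that anchors at each free block and tests whether a whole run of file_len free blocks fits there.
-- outside the precondition, e.g. on find_leftmost_fit(['.', '.'], 1, 5): A returns 0, B returns 0
import Mathlib
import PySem

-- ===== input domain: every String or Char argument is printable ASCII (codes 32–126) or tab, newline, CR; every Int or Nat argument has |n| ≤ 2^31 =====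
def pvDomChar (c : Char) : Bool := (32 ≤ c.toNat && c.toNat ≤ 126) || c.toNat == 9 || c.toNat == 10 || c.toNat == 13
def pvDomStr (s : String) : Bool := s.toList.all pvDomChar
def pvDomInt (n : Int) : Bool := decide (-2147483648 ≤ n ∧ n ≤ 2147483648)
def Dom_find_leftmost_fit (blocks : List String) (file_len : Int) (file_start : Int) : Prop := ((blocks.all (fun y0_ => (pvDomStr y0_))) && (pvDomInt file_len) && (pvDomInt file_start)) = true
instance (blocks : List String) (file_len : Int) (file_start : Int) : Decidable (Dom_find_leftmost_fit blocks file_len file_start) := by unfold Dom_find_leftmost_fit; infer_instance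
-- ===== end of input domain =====

-- B replaces A's stateful running-counter pass by a window scan anchored at each free block
-- (objective: alternative decomposition, not faster); return values agree wherever A returns
-- within Pre_ (A raises IndexError when the loop runs past the end of blocks).

-- ===== PORT A =====
-- `for i in range(file_start)` as fuel-indexed recursion on the index i (fuel = remaining
-- iterations, so the huge lazy Python range is never materialized); loop state (count, start_run);
-- pyGet? = none is Python's IndexError (unreachable under Pre_, -1 here)
def goA (blocks : List String) (file_len : Int) : Nat → Int → Int → Int → Int
  | 0, _, _, _ => -1
  | n + 1, i, count, start_run =>
    match PySem.List.pyGet? blocks i with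
    | none => -1
    | some b =>
      if b = "." then
        let start_run' := if count = 0 then i else start_run
        let count' := count + 1
        if file_len ≤ count' then start_run'
        else goA blocks file_len n (i + 1) count' start_run'
      else goA blocks file_len n (i + 1) 0 (-1)

def find_leftmost_fit (blocks : List String) (file_len : Int) (file_start : Int) : Int :=
  goA blocks file_len file_start.toNat 0 0 (-1)

-- ===== PORT B =====
-- all(blocks[start+k] == '.' for k in range(1, file_len)): short-circuiting scan over k with
-- fuel = (file_len - 1).toNat remaining iterations; pyGet? = none is Python's IndexError
-- (unreachable under Pre_ once the `start + file_len ≤ file_start` guard holds; false here)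
def winB (blocks : List String) (start : Int) : Nat → Int → Bool
  | 0, _ => true
  | n + 1, k =>
    match PySem.List.pyGet? blocks (start + k) with
    | none => false
    | some b => if b = "." then winB blocks start n (k + 1) else false

-- `for start in range(file_start)` as fuel-indexed recursion on start; nested ifs = Python's
-- short-circuit `and`
def goB (blocks : List String) (file_len file_start : Int) : Nat → Int → Int
  | 0, _ => -1
  | n + 1, start =>
    match PySem.List.pyGet? blocks start with
    | none => -1
    | some b =>
      if b ≠ "." then goB blocks file_len file_start n (start + 1)
      else if start + file_len ≤ file_start then
        if winB blocks start (file_len - 1).toNat 1 then start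
        else goB blocks file_len file_start n (start + 1)
      else goB blocks file_len file_start n (start + 1)

def find_leftmost_fit_alt (blocks : List String) (file_len : Int) (file_start : Int) : Int :=
  goB blocks file_len file_start file_start.toNat 0

-- ===== PRECONDITION & SPEC =====
-- Pre_ excludes file_start > len(blocks): there A's loop runs past the end of blocks and raises
-- IndexError unless a fitting run happens to appear before the end (on those early-return inputs
-- both programs return the same value, see the cite).
def Pre_find_leftmost_fit (blocks : List String) (file_len : Int) (file_start : Int) : Prop :=
  file_start ≤ (blocks.length : Int)
instance (blocks : List String) (file_len : Int) (file_start : Int) : Decidable (Pre_find_leftmost_fit blocks file_len file_start) := by unfold Pre_find_leftmost_fit; infer_instance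

def pvWitness_find_leftmost_fit : List String × Int × Int := (["x", ".", ".", "y"], 2, 4)

def Spec_find_leftmost_fit (blocks : List String) (file_len : Int) (file_start : Int) (out : Int) : Prop := out = find_leftmost_fit_alt blocks file_len file_start
instance (blocks : List String) (file_len : Int) (file_start : Int) (out : Int) : Decidable (Spec_find_leftmost_fit blocks file_len file_start out) := by unfold Spec_find_leftmost_fit; infer_instance

-- ===== CLAIM (what is proved, stated in full; the proofs are below) =====
def Claim_equal_find_leftmost_fit : Prop := ∀ (blocks : List String) (file_len : Int) (file_start : Int), Dom_find_leftmost_fit blocks file_len file_start → Pre_find_leftmost_fit blocks file_len file_start → Spec_find_leftmost_fit blocks file_len file_start (find_leftmost_fit blocks file_len file_start)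

-- ===== LEMMAS AND PROOFS =====

-- file_len ≤ 0: both return the index of the first '.' before file_start (or -1)
lemma eq_of_nonpos (blocks : List String) (fl fs : Int) (hfl : fl ≤ 0) :
    ∀ (n : Nat) (i : Int), (fs - i).toNat = n →
      goA blocks fl n i 0 (-1) = goB blocks fl fs n i := by
  intro n
  induction n with
  | zero => intro i _; rfl
  | succ n ih =>
    intro i hn
    have hi : i < fs := by omega
    cases hget : PySem.List.pyGet? blocks i with
    | none => simp only [goA, goB, hget]
    | some b =>
      by_cases hb : b = "."
      · subst hb
        have h2 : i + fl ≤ fs := by omega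
        have hwin : winB blocks i (fl - 1).toNat 1 = true := by
          have h0 : (fl - 1).toNat = 0 := by omega
          rw [h0]
          rfl
        simp only [goA, goB, hget]
        rw [if_pos trivial, if_pos (by omega : fl ≤ 0 + 1), if_pos trivial,
          if_neg (by simp : ¬ ("." : String) ≠ "."), if_pos h2, if_pos hwin]
      · simp only [goA, goB, hget, ne_eq, hb, not_false_eq_true, if_pos, if_neg]
        exact ih (i + 1) (by omega)

-- the window test succeeds when every tested position holds '.'
lemma winB_true (blocks : List String) (start fl : Int) :
    ∀ (n : Nat) (k : Int), (fl - k).toNat = n → 1 ≤ k →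
      (∀ j : Int, k ≤ j → j < fl → PySem.List.pyGet? blocks (start + j) = some ".") →
      winB blocks start n k = true := by
  intro n
  induction n with
  | zero => intro k _ _ _; rfl
  | succ n ih =>
    intro k hn hk hdots
    have hkfl : k < fl := by omega
    simp only [winB, hdots k le_rfl hkfl, if_pos]
    exact ih (k + 1) (by omega) (by omega) (fun j h1 h2 => hdots j (by omega) h2)

-- the window test fails when some reachable tested position holds a non-'.'
lemma winB_false (blocks : List String) (start : Int) (bm : String) (hbm : ¬ bm = ".") :
    ∀ (n : Nat) (k m : Int), k ≤ m → (m - k).toNat < n →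
      (∀ j : Int, k ≤ j → j < m → PySem.List.pyGet? blocks (start + j) = some ".") →
      PySem.List.pyGet? blocks (start + m) = some bm →
      winB blocks start n k = false := by
  intro n
  induction n with
  | zero => intro k m _ h; omega
  | succ n ih =>
    intro k m hkm hlt hdots hm
    rcases lt_or_eq_of_le hkm with h | h
    · simp only [winB, hdots k le_rfl h, if_pos]
      exact ih (k + 1) m (by omega) (by omega) (fun j h1 h2 => hdots j (by omega) h2) hm
    · subst h
      simp only [winB, hm, if_neg hbm]

-- B skips every index in [j, t) on which its candidate test fails
lemma goB_skip (blocks : List String) (fl fs : Int) :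
    ∀ (m : Nat) (j t : Int) (nj : Nat), (t - j).toNat = m → j ≤ t → (fs - j).toNat = nj →
      (∀ x : Int, j ≤ x → x < t → x < fs →
        ∃ b, PySem.List.pyGet? blocks x = some b ∧
          (b = "." → ¬ (x + fl ≤ fs ∧ winB blocks x (fl - 1).toNat 1 = true))) →
      goB blocks fl fs nj j = goB blocks fl fs ((fs - t).toNat) t := by
  intro m
  induction m with
  | zero =>
    intro j t nj hm hjt hnj _
    have h1 : j = t := by omega
    subst h1
    rw [hnj]
  | succ m ih =>
    intro j t nj hm hjt hnj hskip
    have hjt' : j < t := by omega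
    by_cases hjfs : fs ≤ j
    · rw [show nj = 0 by omega, show (fs - t).toNat = 0 by omega]
      rfl
    · have hjfs' : j < fs := by omega
      obtain ⟨b, hb, hns⟩ := hskip j le_rfl hjt' hjfs'
      rw [show nj = (fs - (j + 1)).toNat + 1 by omega]
      simp only [goB, hb]
      have hrec :
          goB blocks fl fs ((fs - (j + 1)).toNat) (j + 1)
            = goB blocks fl fs ((fs - t).toNat) t := by
        refine ih (j + 1) t ((fs - (j + 1)).toNat) (by omega) (by omega) rfl ?_
        intro x hx1 hx2 hx3
        exact hskip x (by omega) hx2 hx3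
      by_cases hbd : b = "."
      · rw [if_neg (by simp [hbd])]
        by_cases hg : j + fl ≤ fs
        · rw [if_pos hg, if_neg (fun hw => hns hbd ⟨hg, hw⟩)]
          exact hrec
        · rw [if_neg hg]
          exact hrec
      · rw [if_pos hbd]
        exact hrec

-- main invariant lemma for file_len ≥ 1: A at index i with `count` trailing dots equals
-- B restarted at the beginning of the current run, i - count
lemma main_pos (blocks : List String) (fl fs : Int) (hfl : 1 ≤ fl)
    (hfs : fs ≤ (blocks.length : Int)) :
    ∀ (n : Nat) (i count start_run : Int), (fs - i).toNat = n →
      0 ≤ count → count < fl → 0 ≤ i - count →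
      (count ≠ 0 → start_run = i - count) →
      (∀ j : Int, i - count ≤ j → j < i → PySem.List.pyGet? blocks j = some ".") →
      goA blocks fl n i count start_run
        = goB blocks fl fs ((fs - (i - count)).toNat) (i - count) := by
  intro n
  induction n with
  | zero =>
    intro i count start_run hn hc0 hcfl hic hsr hdots
    have hfsi : fs ≤ i := by omega
    by_cases hend : fs ≤ i - count
    · rw [show (fs - (i - count)).toNat = 0 by omega]
      rfl
    · have hskip :
          goB blocks fl fs ((fs - (i - count)).toNat) (i - count)
            = goB blocks fl fs ((fs - fs).toNat) fs := by
        refine goB_skip blocks fl fs (fs - (i - count)).toNat (i - count) fs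
          ((fs - (i - count)).toNat) rfl (by omega) rfl ?_
        intro x hx1 hx2 _
        refine ⟨".", hdots x hx1 (by omega), fun _ hcon => ?_⟩
        omega
      rw [hskip, show (fs - fs).toNat = 0 by omega]
      rfl
  | succ n ih =>
    intro i count start_run hn hc0 hcfl hic hsr hdots
    have hi : i < fs := by omega
    have hi0 : 0 ≤ i := by omega
    have hilt : i.toNat < blocks.length := by omega
    have hgi : PySem.List.pyGet? blocks i = some blocks[i.toNat] :=
      PySem.List.pyGet?_eq_some_getElem blocks (by omega) (by omega)
    simp only [goA, hgi]
    have hsr' : (if count = 0 then i else start_run) = i - count := by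
      by_cases h : count = 0
      · rw [if_pos h]; omega
      · rw [if_neg h]; rw [hsr h]
    by_cases hbi : blocks[i.toNat] = "."
    · rw [if_pos hbi]
      have hdots' : ∀ j : Int, i - count ≤ j → j ≤ i → PySem.List.pyGet? blocks j = some "." := by
        intro j hj1 hj2
        rcases lt_or_eq_of_le hj2 with h | h
        · exact hdots j hj1 h
        · rw [h, hgi, hbi]
      by_cases hret : fl ≤ count + 1
      · simp only [if_pos hret]
        rw [hsr']
        -- show B returns i - count
        rw [show (fs - (i - count)).toNat = (fs - (i - count) - 1).toNat + 1 by omega]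
        simp only [goB, hdots' (i - count) le_rfl (by omega)]
        rw [if_neg (by simp), if_pos (by omega : i - count + fl ≤ fs), if_pos ?_]
        refine winB_true blocks (i - count) fl (fl - 1).toNat 1 (by omega) le_rfl ?_
        intro j hj1 hj2
        exact hdots' (i - count + j) (by omega) (by omega)
      · simp only [if_neg hret]
        have := ih (i + 1) (count + 1) (if count = 0 then i else start_run)
          (by omega) (by omega) (by omega) (by omega)
          (by intro _; rw [hsr']; omega)
          (by intro j hj1 hj2; exact hdots' j (by omega) (by omega))
        rw [show i + 1 - (count + 1) = i - count by ring] at this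
        exact this
    · rw [if_neg hbi]
      have hA := ih (i + 1) 0 (-1) (by omega) (by omega) (by omega) (by omega)
        (by intro h; exact absurd rfl h) (by intro j hj1 hj2; omega)
      rw [show i + 1 - 0 = i + 1 by ring] at hA
      rw [hA]
      have hskip :
          goB blocks fl fs ((fs - (i - count)).toNat) (i - count)
            = goB blocks fl fs ((fs - (i + 1)).toNat) (i + 1) := by
        refine goB_skip blocks fl fs (i + 1 - (i - count)).toNat (i - count) (i + 1)
          ((fs - (i - count)).toNat) rfl (by omega) rfl ?_
        intro x hx1 hx2 hx3
        rcases lt_or_eq_of_le (by omega : x ≤ i) with h | h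
        · refine ⟨".", hdots x hx1 h, fun _ hcon => ?_⟩
          obtain ⟨hguard, hwin⟩ := hcon
          have hfalse : winB blocks x (fl - 1).toNat 1 = false := by
            refine winB_false blocks x blocks[i.toNat] hbi (fl - 1).toNat 1 (i - x)
              (by omega) (by omega) ?_ ?_
            · intro j hj1 hj2
              exact hdots (x + j) (by omega) (by omega)
            · rw [show x + (i - x) = i by ring]
              exact hgi
          rw [hfalse] at hwin
          exact absurd hwin (by simp)
        · subst h
          exact ⟨_, hgi, fun hd _ => hbi hd⟩
      rw [hskip]

-- ===== VERDICT (by name: the statement is the Claim_ definition above) =====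
theorem find_leftmost_fit_spec : Claim_equal_find_leftmost_fit := by
  intro blocks fl fs _hdom hpre
  unfold Spec_find_leftmost_fit find_leftmost_fit find_leftmost_fit_alt
  by_cases hfl : fl ≤ 0
  · exact eq_of_nonpos blocks fl fs hfl fs.toNat 0 (by omega)
  · have h := main_pos blocks fl fs (by omega) hpre fs.toNat 0 0 (-1) (by omega)
      (by omega) (by omega) (by omega) (by intro h; exact absurd rfl h)
      (by intro j h1 h2; omega)
    rw [show fs - (0 - 0) = fs by ring] at h
    exact h
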